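-- pv_equiv track=rewrite | github.com/getsentry/sentry | src/sentry/lang/javascript/sourcemaps.py | parse_vlq
-- ===== SOURCE A (Python) =====
-- B64 = dict(
--     (c, i) for i, c in
--     enumerate('ABCDEFGHIJKLMNOPQRSTUVWXYZabcdefghijklmnopqrstuvwxyz0123456789+/')
-- )
--
-- def parse_vlq(segment):
--     """
--     Parse a string of VLQ-encoded data.
--
--     Returns:
--       a list of integers.
--     """
--
--     values = []
--
--     cur, shift = 0, 0
--     for c in segment:
--         val = B64[c]
--         # Each character is 6 bits:
--         # 5 of value and the high bit is the continuation.
--         val, cont = val & 0b11111, val >> 5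
--         cur += val << shift
--         shift += 5
--
--         if not cont:
--             # The low bit of the unpacked value is the sign.
--             cur, sign = cur >> 1, cur & 1
--             if sign:
--                 cur = -cur
--             values.append(cur)
--             cur, shift = 0, 0
--
--     if cur or shift:
--         raise Exception('leftover cur/shift in vlq decode')
--
--     return values
-- ===== SOURCE B (Python) =====
-- B64 = dict(
--     (c, i) for i, c in
--     enumerate('ABCDEFGHIJKLMNOPQRSTUVWXYZabcdefghijklmnopqrstuvwxyz0123456789+/')
-- )
--
-- def parse_vlq(segment):
--     """
--     Parse a string of VLQ-encoded data.
--
--     Returns: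
--       a list of integers.
--     """
--     # First pass: split the stream into complete groups of characters,
--     # closing a group at each character whose continuation bit is clear.
--     groups = []
--     group = []
--     for c in segment:
--         group.append(c)
--         if not (B64[c] >> 5):
--             groups.append(group)
--             group = []
--     if group:
--         raise Exception('leftover cur/shift in vlq decode')
--
--     # Second pass: decode each complete group independently.
--     values = []
--     for g in groups:
--         cur = 0
--         for i, c in enumerate(g):
--             cur += (B64[c] & 0b11111) << (5 * i)
--         cur, sign = cur >> 1, cur & 1
--         if sign:
--             cur = -cur
--         values.append(cur)
--     return values
-- ===== Notes on version B (the rewrite author's own statement) =====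
-- stated objective: alternative
-- what changed: Replaces A's single fused loop with fold state (cur, shift) by a two-pass decomposition: first split the stream into complete groups at clear continuation bits, then decode each group independently with a positional-weight sum.
import Mathlib
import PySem

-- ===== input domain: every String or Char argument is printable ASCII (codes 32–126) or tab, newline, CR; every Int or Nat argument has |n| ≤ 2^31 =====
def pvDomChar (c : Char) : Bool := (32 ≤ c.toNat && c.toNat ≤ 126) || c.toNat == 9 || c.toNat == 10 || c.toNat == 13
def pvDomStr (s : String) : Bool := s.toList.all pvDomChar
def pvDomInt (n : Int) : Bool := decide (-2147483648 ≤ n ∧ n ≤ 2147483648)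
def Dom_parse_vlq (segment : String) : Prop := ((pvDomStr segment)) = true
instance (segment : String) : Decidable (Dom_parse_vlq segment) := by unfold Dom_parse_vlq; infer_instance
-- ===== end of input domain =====

-- B replaces A's fused fold with (cur, shift) state by a two-pass decomposition (split into
-- complete groups, then decode each group by positional weights); alternative, same cost.

-- ===== PORT A =====
-- the module-level B64 table, shared by both ports (a module constant in the Python too)
def pvAlphabet : List Char :=
  "ABCDEFGHIJKLMNOPQRSTUVWXYZabcdefghijklmnopqrstuvwxyz0123456789+/".toList

-- B64[c]; the KeyError for a character outside the alphabet is excluded by Pre_, so the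
-- default 0 is never reached on admitted inputs
def pvB64 (c : Char) : Int := ((PySem.List.index? pvAlphabet c).getD 0 : Nat)

-- one iteration of A's for-loop; state = (values, cur, shift); shift stays a Nat since
-- Python's shift is only ever 0 or increased by 5 (exact on all inputs)
def pvStepA (s : List Int × Int × Nat) (c : Char) : List Int × Int × Nat :=
  let val := pvB64 c
  let val5 := PySem.Int.band val 31
  let cont := val >>> (5 : Nat)
  let cur := s.2.1 + (val5 <<< s.2.2)
  let shift := s.2.2 + 5
  if cont = 0 then
    let sign := PySem.Int.band cur 1
    let cur := cur >>> (1 : Nat)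
    let cur := if sign ≠ 0 then -cur else cur
    (s.1 ++ [cur], 0, 0)
  else
    (s.1, cur, shift)

-- A raises a bare Exception when cur/shift are left over; those inputs are outside Pre_,
-- and there the port simply returns the values collected so far
def parse_vlq (segment : String) : List Int :=
  (segment.toList.foldl pvStepA ([], 0, 0)).1

-- ===== PORT B =====
-- first pass: append c to the current group, close it when the continuation bit is clear
def pvStepB (s : List (List Char) × List Char) (c : Char) : List (List Char) × List Char :=
  let group := s.2 ++ [c]
  if pvB64 c >>> (5 : Nat) = 0 then (s.1 ++ [group], []) else (s.1, group)

-- second pass, inner loop: cur += (B64[c] & 0b11111) << (5 * i) over enumerate(g)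
-- (i ≥ 0 always, so .toNat on the shift amount is exact)
def pvGroupVal (g : List Char) : Int :=
  (PySem.List.enumerate g).foldl
    (fun cur ic => cur + (PySem.Int.band (pvB64 ic.2) 31 <<< (5 * ic.1).toNat)) 0

def pvDecode (g : List Char) : Int :=
  let cur := pvGroupVal g
  let sign := PySem.Int.band cur 1
  let cur := cur >>> (1 : Nat)
  if sign ≠ 0 then -cur else cur

-- B raises the same bare Exception on a non-empty leftover group; outside Pre_ the port
-- just ignores the leftover group, like A's port
def parse_vlq_alt (segment : String) : List Int :=
  ((segment.toList.foldl pvStepB ([], [])).1).map pvDecode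

-- ===== PRECONDITION & SPEC =====
-- Pre_ excludes exactly the inputs on which A raises (and B raises identically): a character
-- outside the base-64 alphabet (KeyError), or a final character with its continuation bit
-- set, which leaves cur/shift over (bare Exception).
def Pre_parse_vlq (segment : String) : Prop :=
  segment.toList.all (fun c => pvAlphabet.contains c) = true ∧
  segment.toList.getLast?.all (fun c => pvB64 c >>> (5 : Nat) == 0) = true
instance (segment : String) : Decidable (Pre_parse_vlq segment) := by
  unfold Pre_parse_vlq; infer_instance

def pvWitness_parse_vlq : String := "AAgBC"

def Spec_parse_vlq (segment : String) (out : List Int) : Prop := out = parse_vlq_alt segment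
instance (segment : String) (out : List Int) : Decidable (Spec_parse_vlq segment out) := by
  unfold Spec_parse_vlq; infer_instance

-- ===== CLAIM (what is proved, stated in full; the proofs are below) =====
def Claim_equal_parse_vlq : Prop := ∀ (segment : String), Dom_parse_vlq segment → Pre_parse_vlq segment → Spec_parse_vlq segment (parse_vlq segment)

-- ===== LEMMAS AND PROOFS =====

-- the groups accumulator of B's first pass is prefix-independent
theorem pv_stepB_groups (cs : List Char) (gs : List (List Char)) (g : List Char) :
    cs.foldl pvStepB (gs, g) =
      (gs ++ (cs.foldl pvStepB ([], g)).1, (cs.foldl pvStepB ([], g)).2) := by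
  induction cs generalizing gs g with
  | nil => simp
  | cons c cs ih =>
    simp only [List.foldl_cons, pvStepB]
    split
    · simp only [List.nil_append]
      rw [ih (gs ++ [g ++ [c]]) [], ih [g ++ [c]] []]
      simp
    · exact ih gs (g ++ [c])

theorem pv_shl_cast (x : Int) (n : Nat) : x <<< ((n : Int)) = x <<< n := by
  rw [Int.shiftLeft_eq_mul_pow, Int.shiftLeft_eq']

theorem pv_groupVal_append (g : List Char) (c : Char) :
    pvGroupVal (g ++ [c]) =
      pvGroupVal g + (PySem.Int.band (pvB64 c) 31 <<< (5 * g.length)) := by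
  simp [pvGroupVal, PySem.List.enumerate_append, PySem.List.enumerate_cons,
        PySem.List.enumerate_nil, List.foldl_append]
  rw [show (5 * ((g.length : Nat) : Int)) = ((5 * g.length : Nat) : Int) by push_cast; ring,
      pv_shl_cast]

-- main invariant: running A's loop from a partially-read group g equals closing groups as
-- B's first pass does and decoding each closed group as B's second pass does
theorem pv_main (cs : List Char) (vs : List Int) (g : List Char) :
    cs.foldl pvStepA (vs, pvGroupVal g, 5 * g.length) =
      (vs ++ ((cs.foldl pvStepB ([], g)).1).map pvDecode,
       pvGroupVal (cs.foldl pvStepB ([], g)).2,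
       5 * (cs.foldl pvStepB ([], g)).2.length) := by
  induction cs generalizing vs g with
  | nil => simp
  | cons c cs ih =>
    simp only [List.foldl_cons, pvStepA, pvStepB]
    have hcur : pvGroupVal g + (PySem.Int.band (pvB64 c) 31 <<< (5 * g.length)) =
        pvGroupVal (g ++ [c]) := (pv_groupVal_append g c).symm
    by_cases hc : pvB64 c >>> (5 : Nat) = 0
    · simp only [hc, hcur, reduceIte, List.nil_append]
      have := ih (vs ++ [pvDecode (g ++ [c])]) []
      rw [show (5 * ([] : List Char).length) = 0 from rfl,
          show pvGroupVal ([] : List Char) = 0 from rfl] at this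
      calc cs.foldl pvStepA (vs ++ [if PySem.Int.band (pvGroupVal (g ++ [c])) 1 ≠ 0 then
              -(pvGroupVal (g ++ [c]) >>> (1 : Nat)) else pvGroupVal (g ++ [c]) >>> (1 : Nat)], 0, 0)
          = cs.foldl pvStepA (vs ++ [pvDecode (g ++ [c])], 0, 0) := by rfl
        _ = _ := by
              rw [this, pv_stepB_groups cs [g ++ [c]] []]
              simp [List.append_assoc]
    · simp only [hc, hcur, reduceIte]
      have hlen : 5 * g.length + 5 = 5 * (g ++ [c]).length := by simp; omega
      rw [hlen]
      exact ih vs (g ++ [c])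

-- ===== VERDICT (by name: the statement is the Claim_ definition above) =====
theorem parse_vlq_spec : Claim_equal_parse_vlq := by
  intro segment _ _
  show parse_vlq segment = parse_vlq_alt segment
  unfold parse_vlq parse_vlq_alt
  have := pv_main segment.toList [] []
  rw [show pvGroupVal ([] : List Char) = 0 from rfl,
      show (5 * ([] : List Char).length) = 0 from rfl] at this
  rw [this]
  simp
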